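-- pv_equiv track=rewrite | github.com/GrzegorzRomanowski/WhiteList | validations.py | format_bank_account
-- ===== SOURCE A (Python) =====
-- def only_digits(number: str) -> str:
--     """ Remains only digits from the string being a number.
--     :param number: input number like PL: 80-180
--     :return: return cleaned number like 80180
--     """
--     new_number = "".join(char for char in number if char.isdigit())
--     return new_number
--
-- def format_bank_account(number: str) -> str:
--     """ Format bank account number to contain only digits and spaces.
--     :param number: uncleaned bank account
--     :return: formatted bank account
--     """
--     new_number = only_digits(number)
--     account = new_number[0:2]
--     for digit_index in range(2, len(new_number)):
--         if digit_index % 4 == 2: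
--             account += " "
--         account += new_number[digit_index]
--     return account
-- ===== SOURCE B (Python) =====
-- def format_bank_account(number: str) -> str:
--     """ Format bank account number to contain only digits and spaces. """
--     s = "".join(char for char in number if char.isdigit())
--     return " ".join([s[:2]] + [s[i:i + 4] for i in range(2, len(s), 4)])
-- ===== Notes on version B (the rewrite author's own statement) =====
-- stated objective: simpler
-- what changed: Replaces the per-character loop with a modulo test and character-by-character concatenation by slicing the cleaned digit string into its 2-then-4 groups at offsets range(2, len, 4) and joining them once with spaces.
import Mathlib
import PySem

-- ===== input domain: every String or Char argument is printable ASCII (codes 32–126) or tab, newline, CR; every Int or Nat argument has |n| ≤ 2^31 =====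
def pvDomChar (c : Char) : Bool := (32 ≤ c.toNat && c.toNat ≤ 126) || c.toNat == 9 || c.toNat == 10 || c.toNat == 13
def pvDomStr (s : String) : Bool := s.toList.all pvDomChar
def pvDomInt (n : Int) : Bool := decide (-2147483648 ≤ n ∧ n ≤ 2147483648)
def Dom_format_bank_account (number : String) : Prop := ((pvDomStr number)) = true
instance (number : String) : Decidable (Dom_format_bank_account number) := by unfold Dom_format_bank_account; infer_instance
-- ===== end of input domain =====

-- B slices the cleaned digit string into its 2-then-4 groups and joins them once with spaces,
-- instead of A's per-character loop with a modulo test (objective: simpler).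

-- ===== PORT A =====
-- helper only_digits: "".join(char for char in number if char.isdigit())
def only_digits (number : String) : String :=
  String.ofList (number.toList.filter PySem.Chars.isdigit)

def format_bank_account (number : String) : String :=
  let new_number := (only_digits number).toList
  let account := PySem.List.slice new_number (some 0) (some 2)
  let account := (PySem.List.pyRange 2 (new_number.length : Int) 1).foldl
    (fun acc i =>
      (if PySem.Int.mod i 4 == 2 then acc ++ [' '] else acc)
        ++ [PySem.List.pyGetD new_number i ' ']) account
  String.ofList account

-- ===== PORT B =====
def format_bank_account_alt (number : String) : String :=
  let s := number.toList.filter PySem.Chars.isdigit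
  let groups := (PySem.List.pyRange 2 (s.length : Int) 4).map
    (fun i => PySem.List.slice s (some i) (some (i + 4)))
  String.ofList (PySem.Chars.join [' '] (PySem.List.slice s none (some 2) :: groups))

-- ===== PRECONDITION & SPEC =====
def Spec_format_bank_account (number : String) (out : String) : Prop := out = format_bank_account_alt number
instance (number : String) (out : String) : Decidable (Spec_format_bank_account number out) := by unfold Spec_format_bank_account; infer_instance

-- ===== CLAIM (what is proved, stated in full; the proofs are below) =====
def Claim_equal_format_bank_account : Prop := ∀ (number : String), Dom_format_bank_account number → Spec_format_bank_account number (format_bank_account number)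

-- ===== LEMMAS AND PROOFS =====

-- The characters A's loop emits starting at absolute index k over the remaining suffix:
-- a space before every index ≡ 2 (mod 4), then the character itself.
def gIns (k : Nat) : List Char → List Char
  | [] => []
  | c :: t => (if k % 4 = 2 then [' '] else []) ++ c :: gIns (k + 1) t

lemma foldA (s : List Char) (k : Nat) (acc : List Char) :
    (PySem.List.pyRange (k : Int) (s.length : Int) 1).foldl
      (fun acc i =>
        (if PySem.Int.mod i 4 == 2 then acc ++ [' '] else acc)
          ++ [PySem.List.pyGetD s i ' ']) acc
      = acc ++ gIns k (s.drop k) := by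
  by_cases h : k < s.length
  · rw [PySem.List.pyRange_one_cons (by exact_mod_cast h)]
    rw [List.drop_eq_getElem_cons h]
    simp only [List.foldl_cons]
    have hget : PySem.List.pyGetD s (k : Int) ' ' = s[k] :=
      PySem.List.pyGetD_eq_getElem s ' ' (by positivity) (by exact_mod_cast h)
    have hmod : PySem.Int.mod (k : Int) 4 = ((k % 4 : Nat) : Int) :=
      PySem.Int.mod_natCast k 4
    have hcast : (k : Int) + 1 = ((k + 1 : Nat) : Int) := by push_cast; ring
    rw [hget, hmod, hcast, foldA s (k + 1)]
    by_cases hk : k % 4 = 2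
    · simp [hk, gIns]
    · have hne : ¬ ((k : Int) % 4 = 2) := by omega
      simp [gIns, hk, hne]
  · rw [PySem.List.pyRange_one_eq_nil (by exact_mod_cast Nat.le_of_not_lt h)]
    rw [List.drop_of_length_le (Nat.le_of_not_lt h)]
    simp [gIns]
termination_by s.length - k

lemma pyRange4_cons (a b : Int) (h : a < b) :
    PySem.List.pyRange a b 4 = a :: PySem.List.pyRange (a + 4) b 4 := by
  rw [PySem.List.pyRange_of_pos a b (by norm_num),
      PySem.List.pyRange_of_pos (a + 4) b (by norm_num)]
  by_cases h4 : a + 4 < b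
  · have hm : ((b - a + 4 - 1) / 4).toNat = ((b - (a + 4) + 4 - 1) / 4).toNat + 1 := by
      have he : b - a + 4 - 1 = (b - (a + 4) + 4 - 1) + 1 * 4 := by ring
      rw [he, Int.add_mul_ediv_right _ _ (by norm_num)]
      have hnn : 0 ≤ (b - (a + 4) + 4 - 1) / 4 := Int.ediv_nonneg (by omega) (by norm_num)
      omega
    rw [if_pos h, if_pos h4, hm, List.range_succ_eq_map]
    simp only [List.map_cons, List.map_map]
    congr 1
    · norm_num
    · apply List.map_congr_left
      intro x _
      simp only [Function.comp_apply]
      push_cast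
      ring
  · have hm : ((b - a + 4 - 1) / 4).toNat = 1 := by
      have h1 : (b - a + 4 - 1) / 4 = 1 := by
        have h0 : (b - a - 1) / 4 = 0 := Int.ediv_eq_zero_of_lt (by omega) (by omega)
        rw [show b - a + 4 - 1 = (b - a - 1) + 1 * 4 by ring,
            Int.add_mul_ediv_right _ _ (by norm_num : (4:Int) ≠ 0), h0]
        norm_num
      omega
    rw [if_pos h, if_neg h4, hm]
    simp

lemma gIns_chunk (k : Nat) (hk : k % 4 = 2) (c : Char) (t : List Char) :
    gIns k (c :: t) = ' ' :: ((c :: t).take 4 ++ gIns (k + 4) ((c :: t).drop 4)) := by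
  have h1 : (k + 1) % 4 = 3 := by omega
  have h2 : (k + 2) % 4 = 0 := by omega
  have h3 : (k + 3) % 4 = 1 := by omega
  match t with
  | [] => simp [gIns, hk]
  | [c1] => simp [gIns, hk, h1]
  | [c1, c2] => simp [gIns, hk, h1, show (k+1+1) % 4 = 0 by omega]
  | c1 :: c2 :: c3 :: rest =>
    simp [gIns, hk, h1, show (k+1+1) % 4 = 0 by omega,
      show (k+1+1+1) % 4 = 1 by omega, show k+1+1+1+1 = k+4 by omega]

lemma chunksB (s : List Char) (k : Nat) (hk : k % 4 = 2) :
    gIns k (s.drop k)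
      = ((PySem.List.pyRange (k : Int) (s.length : Int) 4).map
          (fun i => PySem.List.slice s (some i) (some (i + 4)))).flatMap
          (fun g => ' ' :: g) := by
  by_cases h : k < s.length
  · rw [pyRange4_cons _ _ (by exact_mod_cast h)]
    have hcast : (k : Int) + 4 = ((k + 4 : Nat) : Int) := by push_cast; ring
    have hslice : PySem.List.slice s (some (k : Int)) (some ((k : Int) + 4))
        = (s.drop k).take 4 := by
      rw [hcast, PySem.List.slice_natCast]
      congr 1
      omega
    rw [List.map_cons, List.flatMap_cons, hslice, hcast]
    rw [List.drop_eq_getElem_cons h, gIns_chunk k hk, ← List.drop_eq_getElem_cons h]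
    have hdrop : (s.drop k).drop 4 = s.drop (k + 4) := by
      simp [List.drop_drop, Nat.add_comm k 4]
    rw [hdrop]
    simp only [chunksB s (k + 4) (by omega), List.cons_append]
  · rw [List.drop_of_length_le (Nat.le_of_not_lt h)]
    have hle : (s.length : Int) ≤ (k : Int) := by exact_mod_cast Nat.le_of_not_lt h
    rw [PySem.List.pyRange_of_pos _ _ (by norm_num), if_neg (not_lt.mpr hle)]
    simp [gIns]
termination_by s.length - k

lemma joinSp (gs : List (List Char)) (h : List Char) :
    PySem.Chars.join [' '] (h :: gs) = h ++ gs.flatMap (fun g => ' ' :: g) := by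
  induction gs generalizing h with
  | nil => simp [PySem.Chars.join_singleton]
  | cons g rest ih =>
    rw [PySem.Chars.join_cons_cons, ih g]
    simp

-- ===== VERDICT (by name: the statement is the Claim_ definition above) =====
theorem format_bank_account_spec : Claim_equal_format_bank_account := by
  intro number _
  show format_bank_account number = format_bank_account_alt number
  simp only [format_bank_account, format_bank_account_alt, only_digits, String.toList_ofList]
  set s := number.toList.filter PySem.Chars.isdigit with hsdef
  have h2 : ((2 : Nat) : Int) = (2 : Int) := by norm_num
  have hA := foldA s 2 (PySem.List.slice s (some 0) (some 2))
  rw [h2] at hA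
  rw [hA]
  have hC := chunksB s 2 (by norm_num)
  rw [h2] at hC
  rw [joinSp, ← hC, PySem.List.slice_zero_start,
      PySem.List.slice_to s (by norm_num : (0:Int) ≤ 2)]
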